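-- pv_equiv track=rewrite | github.com/KlaraKant/pg | cviceni2.py | levensteinova_vzdalenost
-- ===== SOURCE A (Python) =====
-- def levensteinova_vzdalenost(dotaz1, dotaz2):
--     """
--     Levensteinova vzdalenost říka, jak jsou 2 řetězce rozdílné, pokud jsou stejné je Levensteinova vzdalenost 0,
--     pro řetězce "čas" a "čaj" je Levensteinova vzdalenost 1 (liší se v 1 písmenu)
--     """
--     i = 0
--     length = min(len(dotaz1), len(dotaz2))
--     vysledek = 0
--     while i < length:
--         if dotaz1[i] != dotaz2[i]:
--             vysledek += 1
--         i += 1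
--     vysledek += abs(len(dotaz1) - len(dotaz2))
--     return vysledek
-- ===== SOURCE B (Python) =====
-- def levensteinova_vzdalenost(dotaz1, dotaz2):
--     """
--     One uniform pass over range(max(len)) comparing one-character slices:
--     past the shorter string the slice is '' and never equals a 1-char slice,
--     so the length difference is counted automatically (no min loop, no abs).
--     """
--     n = max(len(dotaz1), len(dotaz2))
--     return sum(1 for i in range(n) if dotaz1[i:i+1] != dotaz2[i:i+1])
-- ===== Notes on version B (the rewrite author's own statement) =====
-- stated objective: alternative
-- what changed: Replaced the two-part computation (index loop over the common prefix plus an abs() length correction) by one uniform pass over range(max(len)) comparing one-character slices, where an empty slice past the shorter string counts as a mismatch automatically.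
import Mathlib
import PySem

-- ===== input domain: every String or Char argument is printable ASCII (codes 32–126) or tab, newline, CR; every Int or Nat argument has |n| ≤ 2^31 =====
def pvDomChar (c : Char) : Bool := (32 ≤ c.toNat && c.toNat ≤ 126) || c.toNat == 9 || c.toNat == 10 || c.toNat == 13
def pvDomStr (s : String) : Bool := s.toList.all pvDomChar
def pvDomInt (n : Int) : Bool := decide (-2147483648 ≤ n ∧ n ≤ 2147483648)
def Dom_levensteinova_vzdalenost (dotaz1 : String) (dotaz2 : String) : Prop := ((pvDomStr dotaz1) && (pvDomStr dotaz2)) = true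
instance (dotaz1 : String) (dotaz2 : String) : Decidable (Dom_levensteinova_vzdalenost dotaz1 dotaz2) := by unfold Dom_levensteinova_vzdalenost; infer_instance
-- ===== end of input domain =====

-- B replaces A's prefix loop + abs() length correction by one uniform pass over
-- range(max(len)) comparing one-character slices (alternative decomposition, same cost).

-- ===== PORT A =====
-- while i < length: count dotaz1[i] != dotaz2[i]; indices stay in range, so
-- pyGetD with a default is exact here (IndexError is unreachable).
def levensteinova_vzdalenost (dotaz1 : String) (dotaz2 : String) : Int :=
  let l1 := dotaz1.toList
  let l2 := dotaz2.toList
  let length : Int := min (l1.length : Int) (l2.length : Int)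
  let vysledek : Int := (PySem.List.pyRange 0 length 1).foldl
      (fun acc i => if PySem.List.pyGetD l1 i ' ' ≠ PySem.List.pyGetD l2 i ' ' then acc + 1 else acc) 0
  vysledek + |(l1.length : Int) - (l2.length : Int)|

-- ===== PORT B =====
-- sum(1 for i in range(max(len,len)) if dotaz1[i:i+1] != dotaz2[i:i+1])
def levensteinova_vzdalenost_alt (dotaz1 : String) (dotaz2 : String) : Int :=
  let l1 := dotaz1.toList
  let l2 := dotaz2.toList
  let n : Int := max (l1.length : Int) (l2.length : Int)
  ((PySem.List.pyRange 0 n 1).map (fun i =>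
      if PySem.List.slice l1 (some i) (some (i + 1)) ≠ PySem.List.slice l2 (some i) (some (i + 1))
      then (1 : Int) else 0)).sum

-- ===== PRECONDITION & SPEC =====
def Spec_levensteinova_vzdalenost (dotaz1 : String) (dotaz2 : String) (out : Int) : Prop := out = levensteinova_vzdalenost_alt dotaz1 dotaz2
instance (dotaz1 : String) (dotaz2 : String) (out : Int) : Decidable (Spec_levensteinova_vzdalenost dotaz1 dotaz2 out) := by unfold Spec_levensteinova_vzdalenost; infer_instance

-- ===== CLAIM (what is proved, stated in full; the proofs are below) =====
def Claim_equal_levensteinova_vzdalenost : Prop := ∀ (dotaz1 : String) (dotaz2 : String), Dom_levensteinova_vzdalenost dotaz1 dotaz2 → Spec_levensteinova_vzdalenost dotaz1 dotaz2 (levensteinova_vzdalenost dotaz1 dotaz2)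

-- ===== LEMMAS AND PROOFS =====

-- common normal form: positionwise mismatch count, tail past the shorter list all mismatches
def cnt : List Char → List Char → Int
  | [], l2 => (l2.length : Int)
  | _ :: t1, [] => (t1.length : Int) + 1
  | a :: t1, b :: t2 => (if a ≠ b then 1 else 0) + cnt t1 t2

lemma countP_pyRange_succ (p : Int → Bool) (n : Nat) :
    (PySem.List.pyRange 0 ((n : Int) + 1) 1).countP p
      = (if p 0 then 1 else 0) + (PySem.List.pyRange 0 (n : Int) 1).countP (fun j => p (j + 1)) := by
  rw [PySem.List.pyRange_one 0 ((n : Int) + 1), PySem.List.pyRange_one 0 (n : Int)]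
  have h1 : (((n : Int) + 1) - 0).toNat = n + 1 := by omega
  have h2 : ((n : Int) - 0).toNat = n := by omega
  rw [h1, h2, List.range_succ_eq_map]
  simp only [List.countP_map, List.countP_cons]
  have hcong : List.countP ((p ∘ fun k : Nat => (0 : Int) + (k : Int)) ∘ Nat.succ) (List.range n)
      = List.countP ((fun j => p (j + 1)) ∘ fun k : Nat => (0 : Int) + (k : Int)) (List.range n) := by
    apply List.countP_congr
    intro k _
    have h : ((0 : Int) + ((k + 1 : Nat) : Int)) = (((0 : Int) + (k : Int)) + 1) := by push_cast; ring
    simp only [Function.comp, Nat.succ_eq_add_one, h]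
  rw [hcong]
  have h0 : (p ∘ fun k : Nat => (0 : Int) + (k : Int)) 0 = p 0 := by simp
  rw [h0]
  by_cases hp : p 0 <;> simp [hp] <;> try omega

lemma pyGetD_cons_succ (a : Char) (t : List Char) (j : Int) (hj : 0 ≤ j) :
    PySem.List.pyGetD (a :: t) (j + 1) ' ' = PySem.List.pyGetD t j ' ' := by
  obtain ⟨k, rfl⟩ := Int.eq_ofNat_of_zero_le hj
  rw [show ((k : Int) + 1) = (((k + 1 : Nat)) : Int) by push_cast; ring,
    PySem.List.pyGetD_natCast, PySem.List.pyGetD_natCast]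
  simp [List.getD]

lemma slice_one (l : List Char) (k : Nat) :
    PySem.List.slice l (some (k : Int)) (some ((k : Int) + 1)) = (l.drop k).take 1 := by
  rw [show ((k : Int) + 1) = (k : Int) + ((1 : Nat) : Int) by norm_num, PySem.List.slice_natCast_add]

lemma slice_one_ne (l1 l2 : List Char) (k : Nat) (hk : k < l2.length) (hk1 : l1.length ≤ k) :
    PySem.List.slice l1 (some (k : Int)) (some ((k : Int) + 1))
      ≠ PySem.List.slice l2 (some (k : Int)) (some ((k : Int) + 1)) := by
  rw [slice_one, slice_one]
  intro h
  have := congrArg List.length h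
  simp only [List.length_take, List.length_drop] at this
  omega

lemma keyA : ∀ l1 l2 : List Char,
    ((PySem.List.pyRange 0 (min (l1.length : Int) (l2.length : Int)) 1).countP
        (fun j => decide (PySem.List.pyGetD l1 j ' ' ≠ PySem.List.pyGetD l2 j ' ')) : Int)
      + |(l1.length : Int) - (l2.length : Int)| = cnt l1 l2 := by
  intro l1
  induction l1 with
  | nil =>
    intro l2
    rw [show min ((List.length ([] : List Char)) : Int) ((l2.length : Int)) = 0 by simp,
      PySem.List.pyRange_one_eq_nil (by omega)]
    simp [cnt, abs_of_nonpos]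
  | cons a t1 ih =>
    intro l2
    cases l2 with
    | nil =>
      rw [show min (((a :: t1).length : Int)) ((List.length ([] : List Char)) : Int) = 0 by simp only [List.length_nil, List.length_cons]; push_cast; omega,
        PySem.List.pyRange_one_eq_nil (by omega)]
      simp [cnt]
      all_goals omega
    | cons b t2 =>
      have hmin : min (((a :: t1).length : Int)) (((b :: t2).length : Int))
          = ((min t1.length t2.length : Nat) : Int) + 1 := by
        simp only [List.length_cons]; push_cast; omega
      rw [hmin, countP_pyRange_succ]
      have h0a : PySem.List.pyGetD (a :: t1) 0 ' ' = a := by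
        rw [show (0 : Int) = ((0 : Nat) : Int) from rfl, PySem.List.pyGetD_natCast]; rfl
      have h0b : PySem.List.pyGetD (b :: t2) 0 ' ' = b := by
        rw [show (0 : Int) = ((0 : Nat) : Int) from rfl, PySem.List.pyGetD_natCast]; rfl
      have hshift : (PySem.List.pyRange 0 ((min t1.length t2.length : Nat) : Int) 1).countP
            (fun j => decide (PySem.List.pyGetD (a :: t1) (j + 1) ' ' ≠ PySem.List.pyGetD (b :: t2) (j + 1) ' '))
          = (PySem.List.pyRange 0 ((min t1.length t2.length : Nat) : Int) 1).countP
            (fun j => decide (PySem.List.pyGetD t1 j ' ' ≠ PySem.List.pyGetD t2 j ' ')) := by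
        apply List.countP_congr
        intro j hj
        have h0j : 0 ≤ j := (PySem.List.mem_pyRange_one.1 hj).1
        rw [pyGetD_cons_succ a t1 j h0j, pyGetD_cons_succ b t2 j h0j]
      rw [hshift]
      have habs : |(((a :: t1).length : Nat) : Int) - (((b :: t2).length : Nat) : Int)|
          = |(t1.length : Int) - (t2.length : Int)| := by
        simp only [List.length_cons]; push_cast
        congr 1; ring
      have hIH := ih t2
      rw [show ((min t1.length t2.length : Nat) : Int) = min (t1.length : Int) (t2.length : Int) by push_cast; rfl] at *
      rw [h0a, h0b, habs]
      simp only [cnt]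
      rw [← hIH]
      by_cases hab : a = b <;> (simp [hab]; try ring)

lemma keyB_nil (l2 : List Char) :
    ((PySem.List.pyRange 0 (l2.length : Int) 1).countP
        (fun j => decide (PySem.List.slice ([] : List Char) (some j) (some (j + 1))
          ≠ PySem.List.slice l2 (some j) (some (j + 1)))) : Nat)
      = l2.length := by
  rw [List.countP_eq_length.2, PySem.List.length_pyRange_one]
  · omega
  · intro j hj
    obtain ⟨h0, hlt⟩ := PySem.List.mem_pyRange_one.1 hj
    obtain ⟨k, rfl⟩ := Int.eq_ofNat_of_zero_le h0
    simp only [decide_eq_true_eq]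
    exact slice_one_ne [] l2 k (by exact_mod_cast hlt) (by simp)

lemma keyB : ∀ l1 l2 : List Char,
    ((PySem.List.pyRange 0 (max (l1.length : Int) (l2.length : Int)) 1).countP
        (fun j => decide (PySem.List.slice l1 (some j) (some (j + 1)) ≠ PySem.List.slice l2 (some j) (some (j + 1)))) : Int)
      = cnt l1 l2 := by
  intro l1
  induction l1 with
  | nil =>
    intro l2
    rw [show max ((List.length ([] : List Char)) : Int) ((l2.length : Int)) = (l2.length : Int) by simp]
    rw [keyB_nil l2]
    simp [cnt]
  | cons a t1 ih =>
    intro l2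
    cases l2 with
    | nil =>
      rw [show max (((a :: t1).length : Int)) ((List.length ([] : List Char)) : Int) = ((a :: t1).length : Int) by simp only [List.length_nil, List.length_cons]; push_cast; omega]
      have : ((PySem.List.pyRange 0 ((a :: t1).length : Int) 1).countP
          (fun j => decide (PySem.List.slice (a :: t1) (some j) (some (j + 1))
            ≠ PySem.List.slice ([] : List Char) (some j) (some (j + 1)))) : Nat) = (a :: t1).length := by
        rw [List.countP_eq_length.2, PySem.List.length_pyRange_one]
        · omega
        · intro j hj
          obtain ⟨h0, hlt⟩ := PySem.List.mem_pyRange_one.1 hj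
          obtain ⟨k, rfl⟩ := Int.eq_ofNat_of_zero_le h0
          simp only [decide_eq_true_eq]
          exact fun h => slice_one_ne [] (a :: t1) k (by exact_mod_cast hlt) (by simp) h.symm
      rw [this]
      simp [cnt]
    | cons b t2 =>
      have hmax : max (((a :: t1).length : Int)) (((b :: t2).length : Int))
          = ((max t1.length t2.length : Nat) : Int) + 1 := by
        simp only [List.length_cons]; push_cast; omega
      rw [hmax, countP_pyRange_succ]
      have h0 : PySem.List.slice (a :: t1) (some (0 : Int)) (some ((0 : Int) + 1)) = [a] := by
        have := slice_one (a :: t1) 0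
        simpa using this
      have h0' : PySem.List.slice (b :: t2) (some (0 : Int)) (some ((0 : Int) + 1)) = [b] := by
        have := slice_one (b :: t2) 0
        simpa using this
      have hshift : (PySem.List.pyRange 0 ((max t1.length t2.length : Nat) : Int) 1).countP
            (fun j => decide (PySem.List.slice (a :: t1) (some (j + 1)) (some (j + 1 + 1))
              ≠ PySem.List.slice (b :: t2) (some (j + 1)) (some (j + 1 + 1))))
          = (PySem.List.pyRange 0 ((max t1.length t2.length : Nat) : Int) 1).countP
            (fun j => decide (PySem.List.slice t1 (some j) (some (j + 1))
              ≠ PySem.List.slice t2 (some j) (some (j + 1)))) := by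
        apply List.countP_congr
        intro j hj
        have h0j : 0 ≤ j := (PySem.List.mem_pyRange_one.1 hj).1
        obtain ⟨k, rfl⟩ := Int.eq_ofNat_of_zero_le h0j
        have hc : ∀ t : List Char, ∀ c : Char, PySem.List.slice (c :: t) (some ((k : Int) + 1)) (some ((k : Int) + 1 + 1))
            = PySem.List.slice t (some (k : Int)) (some ((k : Int) + 1)) := by
          intro t c
          rw [slice_one t k,
            show ((k : Int) + 1) = (((k + 1 : Nat)) : Int) by push_cast; ring]
          rw [slice_one (c :: t) (k + 1)]
          rfl
        rw [hc t1 a, hc t2 b]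
      rw [hshift]
      have hIH := ih t2
      rw [show ((max t1.length t2.length : Nat) : Int) = max (t1.length : Int) (t2.length : Int) by push_cast; rfl] at *
      rw [h0, h0']
      push_cast
      rw [hIH]
      simp only [cnt]
      by_cases hab : a = b <;> simp [hab]

-- ===== VERDICT (by name: the statement is the Claim_ definition above) =====
theorem levensteinova_vzdalenost_spec : Claim_equal_levensteinova_vzdalenost := by
  intro d1 d2 _
  unfold Spec_levensteinova_vzdalenost levensteinova_vzdalenost levensteinova_vzdalenost_alt
  simp only []
  rw [PySem.List.foldl_ite_add_one]
  have hB : (fun i => if PySem.List.slice d1.toList (some i) (some (i + 1))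
        ≠ PySem.List.slice d2.toList (some i) (some (i + 1)) then (1 : Int) else 0)
      = fun i => if (decide (PySem.List.slice d1.toList (some i) (some (i + 1))
        ≠ PySem.List.slice d2.toList (some i) (some (i + 1)))) = true then (1 : Int) else 0 := by
    funext i; split_ifs <;> simp_all
  rw [hB, PySem.List.sum_map_ite_one_zero, zero_add,
    keyA d1.toList d2.toList, keyB d1.toList d2.toList]
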